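-- pv_equiv track=rewrite | github.com/astefek/Escape-Room-Game | main_game/shape_puzzle/shape_puzzle.py | close_enough
-- ===== SOURCE A (Python) =====
-- def close_enough(moved_shape, win_tuple):
--     """Takes a moved shape and a tuple of original shape positions and checks
--     if it fits close enough to be counted as a win."""
--     matches = 0
--     for win_shape in win_tuple:
--         for vertex in moved_shape:
--             for x_leeway in range(-5,5):
--                 for y_leeway in range(-5,5):
--                     if (vertex[0] + x_leeway, vertex[1] + y_leeway) in win_shape:
--                         matches += 1
--     if matches >= len(win_shape):
--         return 1
--     else: return 0
-- ===== SOURCE B (Python) =====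
-- def close_enough(moved_shape, win_tuple):
--     """Takes a moved shape and a tuple of original shape positions and checks
--     if it fits close enough to be counted as a win."""
--     matches = 0
--     for win_shape in win_tuple:
--         points = set(win_shape)
--         for vertex in moved_shape:
--             for p in points:
--                 if -5 <= p[0] - vertex[0] <= 4 and -5 <= p[1] - vertex[1] <= 4:
--                     matches += 1
--     return 1 if matches >= len(win_shape) else 0
-- ===== Notes on version B (the rewrite author's own statement) =====
-- stated objective: faster
-- what changed: B drops A's 100-candidate offset enumeration per (win_shape, vertex) pair and instead scans the deduplicated win points once with a bounding-box test, which counts exactly the offsets A finds.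
import Mathlib
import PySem

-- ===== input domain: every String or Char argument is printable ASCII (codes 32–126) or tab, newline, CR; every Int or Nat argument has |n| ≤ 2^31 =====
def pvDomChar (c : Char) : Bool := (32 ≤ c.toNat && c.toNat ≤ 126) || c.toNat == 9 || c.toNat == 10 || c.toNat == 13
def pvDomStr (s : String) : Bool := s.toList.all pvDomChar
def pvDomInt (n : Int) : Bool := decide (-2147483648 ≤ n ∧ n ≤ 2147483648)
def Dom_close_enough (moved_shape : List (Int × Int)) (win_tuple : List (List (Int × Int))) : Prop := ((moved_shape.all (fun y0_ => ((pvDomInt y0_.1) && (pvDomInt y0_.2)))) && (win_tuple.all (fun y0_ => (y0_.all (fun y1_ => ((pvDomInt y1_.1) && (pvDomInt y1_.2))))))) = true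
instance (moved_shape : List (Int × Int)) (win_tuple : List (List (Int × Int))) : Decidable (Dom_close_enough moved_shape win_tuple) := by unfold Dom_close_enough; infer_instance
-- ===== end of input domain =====

-- B replaces A's 10×10 candidate-offset enumeration per vertex with one scan over the
-- deduplicated win points and a bounding-box test (objective: faster, asymptotic in the leeway box).

-- ===== PORT A =====
-- matches += 1 for every offset (x,y) in [-5,5)² with (vertex+offset) ∈ win_shape;
-- the final len(win_shape) reads the loop variable left over from the last iteration.
def close_enough (moved_shape : List (Int × Int)) (win_tuple : List (List (Int × Int))) : Int :=
  let matchCount : Int := win_tuple.foldl (fun m win_shape =>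
    moved_shape.foldl (fun m vertex =>
      (PySem.List.pyRange (-5) 5 1).foldl (fun m x_leeway =>
        (PySem.List.pyRange (-5) 5 1).foldl (fun m y_leeway =>
          if (vertex.1 + x_leeway, vertex.2 + y_leeway) ∈ win_shape then m + 1 else m) m) m) m) 0
  if matchCount ≥ ((win_tuple.getLastD []).length : Int) then 1 else 0

-- ===== PORT B =====
def close_enough_alt (moved_shape : List (Int × Int)) (win_tuple : List (List (Int × Int))) : Int :=
  let matchCount : Int := win_tuple.foldl (fun m win_shape =>
    let points : PySem.Set (Int × Int) := PySem.Set.ofList win_shape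
    moved_shape.foldl (fun m vertex =>
      points.foldl (fun m p =>
        if -5 ≤ p.1 - vertex.1 ∧ p.1 - vertex.1 ≤ 4 ∧ -5 ≤ p.2 - vertex.2 ∧ p.2 - vertex.2 ≤ 4
        then m + 1 else m) m) m) 0
  if matchCount ≥ ((win_tuple.getLastD []).length : Int) then 1 else 0

-- ===== PRECONDITION & SPEC =====
-- Pre_ excludes only empty win_tuple, on which the Python A (and B alike) raises NameError
-- (len(win_shape) reads an unassigned loop variable).
def Pre_close_enough (moved_shape : List (Int × Int)) (win_tuple : List (List (Int × Int))) : Prop := win_tuple ≠ []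
instance (moved_shape : List (Int × Int)) (win_tuple : List (List (Int × Int))) : Decidable (Pre_close_enough moved_shape win_tuple) := by unfold Pre_close_enough; infer_instance
def pvWitness_close_enough : (List (Int × Int)) × (List (List (Int × Int))) := ([(0, 0)], [[(2, 3)]])

def Spec_close_enough (moved_shape : List (Int × Int)) (win_tuple : List (List (Int × Int))) (out : Int) : Prop := out = close_enough_alt moved_shape win_tuple
instance (moved_shape : List (Int × Int)) (win_tuple : List (List (Int × Int))) (out : Int) : Decidable (Spec_close_enough moved_shape win_tuple out) := by unfold Spec_close_enough; infer_instance

-- ===== CLAIM (what is proved, stated in full; the proofs are below) =====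
def Claim_equal_close_enough : Prop := ∀ (moved_shape : List (Int × Int)) (win_tuple : List (List (Int × Int))), Dom_close_enough moved_shape win_tuple → Pre_close_enough moved_shape win_tuple → Spec_close_enough moved_shape win_tuple (close_enough moved_shape win_tuple)

-- ===== LEMMAS AND PROOFS =====

-- countP of a duplicate-free list as a Finset filter card
theorem pv_countP_toFinset {α : Type} [DecidableEq α] (l : List α) (h : l.Nodup) (p : α → Bool) :
    l.countP p = (l.toFinset.filter (fun x => p x = true)).card := by
  rw [List.countP_eq_length_filter, ← List.toFinset_filter]
  exact (List.toFinset_card_of_nodup (h.filter p)).symm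

-- offsets in the 10×10 box hitting ws are in bijection with the distinct points of ws in the box
theorem pv_count_eq (v : Int × Int) (ws : List (Int × Int)) :
    ((PySem.List.pyRange (-5) 5 1).map (fun x =>
      (PySem.List.pyRange (-5) 5 1).countP (fun y => decide ((v.1 + x, v.2 + y) ∈ ws)))).sum
    = (PySem.Set.ofList ws).countP (fun p =>
        decide (-5 ≤ p.1 - v.1 ∧ p.1 - v.1 ≤ 4 ∧ -5 ≤ p.2 - v.2 ∧ p.2 - v.2 ≤ 4)) := by
  have hR : (PySem.List.pyRange (-5) 5 1).Nodup := by decide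
  rw [pv_countP_toFinset _ (PySem.Set.nodup_ofList ws)]
  have hWF : (PySem.Set.ofList ws).toFinset = ws.toFinset := by
    ext x; simp [PySem.Set.mem_ofList]
  rw [hWF]
  simp only [pv_countP_toFinset _ hR]
  rw [← List.sum_toFinset _ hR]
  have key : ∑ x ∈ (PySem.List.pyRange (-5) 5 1).toFinset,
      ((PySem.List.pyRange (-5) 5 1).toFinset.filter
        (fun y => decide ((v.1 + x, v.2 + y) ∈ ws) = true)).card
      = (((PySem.List.pyRange (-5) 5 1).toFinset ×ˢ (PySem.List.pyRange (-5) 5 1).toFinset).filter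
          (fun o => (v.1 + o.1, v.2 + o.2) ∈ ws)).card := by
    rw [Finset.card_filter, Finset.sum_product]
    refine Finset.sum_congr rfl (fun x _ => ?_)
    rw [Finset.card_filter]
    simp only [decide_eq_true_eq]
  rw [key]
  apply Finset.card_bij (fun o _ => (v.1 + o.1, v.2 + o.2))
  · intro o ho
    simp only [Finset.mem_filter, Finset.mem_product, List.mem_toFinset,
      PySem.List.mem_pyRange_one] at ho ⊢
    simp only [decide_eq_true_eq]
    obtain ⟨⟨hx, hy⟩, hm⟩ := ho
    exact ⟨hm, by omega⟩
  · intro a _ b _ h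
    rw [Prod.ext_iff] at h ⊢
    simp at h
    omega
  · intro p hp
    simp only [Finset.mem_filter, List.mem_toFinset, decide_eq_true_eq] at hp
    obtain ⟨hm, hbox⟩ := hp
    refine ⟨(p.1 - v.1, p.2 - v.2), ?_, ?_⟩
    · simp only [Finset.mem_filter, Finset.mem_product, List.mem_toFinset,
        PySem.List.mem_pyRange_one]
      have hpe : (v.1 + (p.1 - v.1), v.2 + (p.2 - v.2)) = p := by
        rw [Prod.ext_iff]; constructor <;> simp
      rw [hpe]
      exact ⟨⟨by omega, by omega⟩, hm⟩
    · rw [Prod.ext_iff]; constructor <;> simp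

-- the inner 10×10 offset count of A equals B's count over the distinct win points
theorem pv_inner_eq (v : Int × Int) (ws : List (Int × Int)) (m : Int) :
    (PySem.List.pyRange (-5) 5 1).foldl (fun m x =>
      (PySem.List.pyRange (-5) 5 1).foldl (fun m y =>
        if (v.1 + x, v.2 + y) ∈ ws then m + 1 else m) m) m
    = (PySem.Set.ofList ws).foldl (fun m p =>
        if -5 ≤ p.1 - v.1 ∧ p.1 - v.1 ≤ 4 ∧ -5 ≤ p.2 - v.2 ∧ p.2 - v.2 ≤ 4
        then m + 1 else m) m := by
  rw [PySem.List.foldl_ite_add_one]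
  simp only [PySem.List.foldl_ite_add_one]
  rw [PySem.List.foldl_add]
  rw [← pv_count_eq v ws]
  congr 1

-- ===== VERDICT (by name: the statement is the Claim_ definition above) =====
theorem close_enough_spec : Claim_equal_close_enough := by
  intro moved_shape win_tuple _ _
  unfold Spec_close_enough close_enough close_enough_alt
  have h : ∀ (m : Int) (ws : List (Int × Int)),
      moved_shape.foldl (fun m vertex =>
        (PySem.List.pyRange (-5) 5 1).foldl (fun m x =>
          (PySem.List.pyRange (-5) 5 1).foldl (fun m y =>
            if (vertex.1 + x, vertex.2 + y) ∈ ws then m + 1 else m) m) m) m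
      = moved_shape.foldl (fun m vertex =>
          (PySem.Set.ofList ws).foldl (fun m p =>
            if -5 ≤ p.1 - vertex.1 ∧ p.1 - vertex.1 ≤ 4 ∧ -5 ≤ p.2 - vertex.2 ∧ p.2 - vertex.2 ≤ 4
            then m + 1 else m) m) m := by
    intro m ws
    apply PySem.List.foldl_congr_mem
    intro acc v _
    exact pv_inner_eq v ws acc
  simp only [h]
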